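-- pv_equiv track=rewrite | github.com/CommitHu502Craft/SoftDoc-Pipeline | modules/skill_autorepair_runner.py | _domain_allowed
-- ===== SOURCE A (Python) =====
-- from typing import Any, Dict, List, Set, Tuple
--
-- def _domain_allowed(domain: str, allowed_domains: List[str]) -> bool:
--     host = str(domain or "").strip().lower()
--     if not host:
--         return False
--     for item in [str(x).strip().lower() for x in (allowed_domains or []) if str(x).strip()]:
--         if host == item or host.endswith(f".{item}"):
--             return True
--     return False
-- ===== SOURCE B (Python) =====
-- def _domain_allowed(domain, allowed_domains):
--     allowed = set()
--     for x in (allowed_domains or []):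
--         s = str(x).strip().lower()
--         if s:
--             allowed.add(s)
--     cand = str(domain or "").strip().lower()
--     while True:
--         if cand in allowed:
--             return True
--         i = cand.find('.')
--         if i == -1:
--             return False
--         cand = cand[i + 1:]
-- ===== Notes on version B (the rewrite author's own statement) =====
-- stated objective: alternative
-- what changed: Instead of scanning the allowed list and testing host==item or host.endswith('.'+item) per entry, B builds the normalized allowed set once and walks the host's dot-suffixes (host, then the part after each successive first dot), returning True on the first set hit.
import Mathlib
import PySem

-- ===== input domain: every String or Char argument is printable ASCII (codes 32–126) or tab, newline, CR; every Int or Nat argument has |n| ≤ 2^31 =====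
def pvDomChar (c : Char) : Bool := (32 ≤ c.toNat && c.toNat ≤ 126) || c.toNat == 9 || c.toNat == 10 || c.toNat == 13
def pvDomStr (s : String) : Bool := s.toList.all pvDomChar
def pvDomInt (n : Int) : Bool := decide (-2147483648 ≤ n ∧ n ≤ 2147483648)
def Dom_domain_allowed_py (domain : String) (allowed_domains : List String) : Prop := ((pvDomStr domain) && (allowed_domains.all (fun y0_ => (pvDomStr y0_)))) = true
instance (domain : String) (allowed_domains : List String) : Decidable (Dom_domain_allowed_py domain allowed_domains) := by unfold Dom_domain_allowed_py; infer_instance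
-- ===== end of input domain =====

-- B replaces A's linear scan of the allowed list with `endswith` per item by a single
-- normalized set built once plus a walk down the host's dot-suffixes with set lookups (alternative/idiomatic).

-- ===== PORT A =====
-- literal port of A: normalize host; early False on empty; scan the normalized,
-- blank-filtered allowed list, testing equality or endswith("." + item).
def domain_allowed_py (domain : String) (allowed_domains : List String) : Bool :=
  let host := PySem.Chars.lower (PySem.Chars.strip domain.toList)
  if host = [] then false
  else
    ((allowed_domains.filter (fun x => decide (PySem.Chars.strip x.toList ≠ []))).map
        (fun x => PySem.Chars.lower (PySem.Chars.strip x.toList))).any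
      (fun item => host == item || PySem.Chars.endswith host ('.' :: item))

-- ===== PORT B =====
-- the normalized set of allowed domains (blank entries dropped), built once
def pvAllowedSet (allowed_domains : List String) : PySem.Set (List Char) :=
  allowed_domains.foldl
    (fun s x =>
      let t := PySem.Chars.lower (PySem.Chars.strip x.toList)
      if t = [] then s else PySem.Set.add s t)
    PySem.Set.empty

-- termination helper for the suffix loop: the first '.' lies inside cand
theorem pvFindDotLt {cand : List Char} (h : PySem.Chars.find cand ['.'] ≠ -1) :
    (PySem.Chars.find cand ['.']).toNat < cand.length := by
  have h0 : 0 ≤ PySem.Chars.find cand ['.'] := by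
    have := PySem.Chars.neg_one_le_find cand ['.']
    omega
  have hpre := (PySem.Chars.find_spec h0).1
  have hne : cand.drop (PySem.Chars.find cand ['.']).toNat ≠ [] := by
    intro hnil
    rw [hnil] at hpre
    simp at hpre
  rw [ne_eq, List.drop_eq_nil_iff] at hne
  omega

-- B's while-loop: try cand, then the part after the first dot
def pvSuffLoop (allowed : PySem.Set (List Char)) (cand : List Char) : Bool :=
  if PySem.Set.contains allowed cand then true
  else
    let i := PySem.Chars.find cand ['.']
    if h : i = -1 then false
    else pvSuffLoop allowed (cand.drop (i.toNat + 1))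
termination_by cand.length
decreasing_by
  have := pvFindDotLt h
  simp only [List.length_drop]
  omega

def domain_allowed_py_alt (domain : String) (allowed_domains : List String) : Bool :=
  let allowed := pvAllowedSet allowed_domains
  let cand := PySem.Chars.lower (PySem.Chars.strip domain.toList)
  pvSuffLoop allowed cand

-- ===== PRECONDITION & SPEC =====
def Spec_domain_allowed_py (domain : String) (allowed_domains : List String) (out : Bool) : Prop := out = domain_allowed_py_alt domain allowed_domains
instance (domain : String) (allowed_domains : List String) (out : Bool) : Decidable (Spec_domain_allowed_py domain allowed_domains out) := by unfold Spec_domain_allowed_py; infer_instance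

-- ===== CLAIM (what is proved, stated in full; the proofs are below) =====
def Claim_equal_domain_allowed_py : Prop := ∀ (domain : String) (allowed_domains : List String), Dom_domain_allowed_py domain allowed_domains → Spec_domain_allowed_py domain allowed_domains (domain_allowed_py domain allowed_domains)

-- ===== LEMMAS AND PROOFS =====

-- membership in the normalized set
theorem mem_pvAllowedSet (c : List Char) (ads : List String) :
    c ∈ pvAllowedSet ads ↔
      ∃ x ∈ ads, PySem.Chars.strip x.toList ≠ [] ∧
        c = PySem.Chars.lower (PySem.Chars.strip x.toList) := by
  have key : ∀ (l : List String) (s : PySem.Set (List Char)),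
      c ∈ l.foldl
        (fun s x =>
          let t := PySem.Chars.lower (PySem.Chars.strip x.toList)
          if t = [] then s else PySem.Set.add s t) s ↔
      c ∈ s ∨ ∃ x ∈ l, PySem.Chars.strip x.toList ≠ [] ∧
        c = PySem.Chars.lower (PySem.Chars.strip x.toList) := by
    intro l
    induction l with
    | nil => simp
    | cons y l ih =>
      intro s
      simp only [List.foldl_cons, ih, List.mem_cons]
      by_cases hy : PySem.Chars.lower (PySem.Chars.strip y.toList) = []
      · have hy' : PySem.Chars.strip y.toList = [] := by
          simpa [PySem.Chars.lower] using hy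
        simp only [hy]
        constructor
        · rintro (hc | ⟨x, hx, hs, hcx⟩)
          · exact Or.inl hc
          · exact Or.inr ⟨x, Or.inr hx, hs, hcx⟩
        · rintro (hc | ⟨x, rfl | hx, hs, hcx⟩)
          · exact Or.inl hc
          · exact absurd hy' hs
          · exact Or.inr ⟨x, hx, hs, hcx⟩
      · simp only [if_neg hy, PySem.Set.mem_add]
        have hy' : PySem.Chars.strip y.toList ≠ [] := by
          intro h; exact hy (by simp [PySem.Chars.lower, h])
        constructor
        · rintro ((hc | hc) | ⟨x, hx, hs, hcx⟩)
          · exact Or.inl hc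
          · exact Or.inr ⟨y, Or.inl rfl, hy', hc⟩
          · exact Or.inr ⟨x, Or.inr hx, hs, hcx⟩
        · rintro (hc | ⟨x, rfl | hx, hs, hcx⟩)
          · exact Or.inl (Or.inl hc)
          · exact Or.inl (Or.inr hcx)
          · exact Or.inr ⟨x, hx, hs, hcx⟩
  simpa [pvAllowedSet, PySem.Set.empty] using key ads PySem.Set.empty

theorem pvAllowedSet_ne_nil {c : List Char} {ads : List String}
    (h : c ∈ pvAllowedSet ads) : c ≠ [] := by
  obtain ⟨x, _, hs, rfl⟩ := (mem_pvAllowedSet c ads).1 h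
  simpa [PySem.Chars.lower] using hs

-- the dot-boundary step: a dotted suffix of cand is either exactly the tail after the
-- first dot, or a dotted suffix of that tail
theorem pvDotSuffixStep {cand c : List Char}
    (hf : PySem.Chars.find cand ['.'] ≠ -1) :
    ('.' :: c) <:+ cand ↔
      (c = cand.drop ((PySem.Chars.find cand ['.']).toNat + 1) ∨
       ('.' :: c) <:+ cand.drop ((PySem.Chars.find cand ['.']).toNat + 1)) := by
  set k := (PySem.Chars.find cand ['.']).toNat with hk
  have h0 : 0 ≤ PySem.Chars.find cand ['.'] := by
    have := PySem.Chars.neg_one_le_find cand ['.']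
    omega
  have hspec := PySem.Chars.find_spec h0
  have hklt : k < cand.length := pvFindDotLt hf
  have hdropk : cand.drop k = '.' :: cand.drop (k + 1) := by
    rw [List.drop_eq_getElem_cons hklt]
    congr 1
    obtain ⟨t, ht⟩ := hspec.1
    have hk? : (cand.drop k)[0]? = some '.' := by rw [← ht]; rfl
    rw [List.getElem?_drop] at hk?
    rw [Nat.add_zero] at hk?
    rw [List.getElem?_eq_getElem hklt] at hk?
    exact Option.some.inj hk?
  constructor
  · rintro ⟨t, ht⟩
    have hj : cand.drop t.length = '.' :: c := by
      rw [← ht, List.drop_left]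
    have hjk : ¬ t.length < k := by
      intro hlt
      exact hspec.2 t.length hlt ⟨c, hj.symm ▸ rfl⟩
    rcases Nat.eq_or_lt_of_le (Nat.le_of_not_lt hjk) with heq | hlt
    · left
      rw [← heq, hdropk] at hj
      simp only [List.cons.injEq, true_and] at hj
      exact hj.symm
    · right
      have : cand.drop t.length = (cand.drop (k + 1)).drop (t.length - (k + 1)) := by
        rw [List.drop_drop]
        congr 1
        omega
      rw [hj] at this
      exact this ▸ List.drop_suffix _ _
  · rintro (rfl | hsuf)
    · exact hdropk ▸ List.drop_suffix k cand
    · exact hsuf.trans (List.drop_suffix _ _)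

-- characterization of B's suffix loop
theorem pvSuffLoop_iff (S : PySem.Set (List Char)) (cand : List Char) :
    pvSuffLoop S cand = true ↔ ∃ c ∈ S, c = cand ∨ ('.' :: c) <:+ cand := by
  induction cand using pvSuffLoop.induct (allowed := S) with
  | case1 cand hc =>
    rw [pvSuffLoop, if_pos hc]
    simp only [true_iff]
    refine ⟨cand, ?_, Or.inl rfl⟩
    simpa [PySem.Set.contains] using hc
  | case2 cand hc i hf =>
    have hf' : PySem.Chars.find cand ['.'] = -1 := hf
    rw [pvSuffLoop, if_neg hc]
    simp only [dif_pos hf']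
    simp only [Bool.false_eq_true, false_iff]
    rintro ⟨c, hcS, rfl | hsuf⟩
    · exact absurd (by simpa [PySem.Set.contains] using hcS) (by simpa using hc)
    · have : ['.'] <:+: cand := by
        obtain ⟨t, ht⟩ := hsuf
        exact ⟨t, c, by simpa using ht⟩
      exact absurd this ((PySem.Chars.find_eq_neg_one_iff cand ['.']).1 hf)
  | case3 cand hc i hf ih =>
    have hf' : ¬ PySem.Chars.find cand ['.'] = -1 := hf
    have ih' : pvSuffLoop S (List.drop ((PySem.Chars.find cand ['.']).toNat + 1) cand) = true ↔
        ∃ c ∈ S, c = List.drop ((PySem.Chars.find cand ['.']).toNat + 1) cand ∨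
          ('.' :: c) <:+ List.drop ((PySem.Chars.find cand ['.']).toNat + 1) cand := ih
    rw [pvSuffLoop, if_neg hc]
    simp only [dif_neg hf']
    rw [ih']
    constructor
    · rintro ⟨c, hcS, hceq | hsuf⟩
      · exact ⟨c, hcS, Or.inr ((pvDotSuffixStep hf').2 (Or.inl hceq))⟩
      · exact ⟨c, hcS, Or.inr ((pvDotSuffixStep hf').2 (Or.inr hsuf))⟩
    · rintro ⟨c, hcS, rfl | hsuf⟩
      · exact absurd (by simpa [PySem.Set.contains] using hcS) (by simpa using hc)
      · rcases (pvDotSuffixStep hf').1 hsuf with h1 | h1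
        · exact ⟨c, hcS, Or.inl h1⟩
        · exact ⟨c, hcS, Or.inr h1⟩

-- ===== VERDICT (by name: the statement is the Claim_ definition above) =====
theorem domain_allowed_py_spec : Claim_equal_domain_allowed_py := by
  intro domain ads _
  unfold Spec_domain_allowed_py domain_allowed_py domain_allowed_py_alt
  set H := PySem.Chars.lower (PySem.Chars.strip domain.toList) with hH
  rw [Bool.eq_iff_iff]
  rw [pvSuffLoop_iff]
  by_cases hE : H = []
  · simp only [hE, if_true, Bool.false_eq_true, false_iff]
    rintro ⟨c, hcS, rfl | hsuf⟩
    · exact pvAllowedSet_ne_nil hcS rfl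
    · simpa using hsuf.length_le
  · rw [if_neg hE]
    rw [List.any_eq_true]
    constructor
    · rintro ⟨item, hitem, hp⟩
      obtain ⟨x, hxf, rfl⟩ := List.mem_map.1 hitem
      have hx := List.mem_filter.1 hxf
      have hxs : PySem.Chars.strip x.toList ≠ [] := by simpa using hx.2
      refine ⟨PySem.Chars.lower (PySem.Chars.strip x.toList),
        (mem_pvAllowedSet _ ads).2 ⟨x, hx.1, hxs, rfl⟩, ?_⟩
      rcases Bool.or_eq_true_iff.1 hp with h | h
      · exact Or.inl (beq_iff_eq.1 h).symm
      · exact Or.inr ((PySem.Chars.endswith_iff _ _).1 h)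
    · rintro ⟨c, hcS, hco⟩
      obtain ⟨x, hxa, hxs, rfl⟩ := (mem_pvAllowedSet c ads).1 hcS
      refine ⟨PySem.Chars.lower (PySem.Chars.strip x.toList),
        List.mem_map.2 ⟨x, List.mem_filter.2 ⟨hxa, by simpa using hxs⟩, rfl⟩, ?_⟩
      rcases hco with h | h
      · exact Bool.or_eq_true_iff.2 (Or.inl (beq_iff_eq.2 h.symm))
      · exact Bool.or_eq_true_iff.2 (Or.inr ((PySem.Chars.endswith_iff _ _).2 h))
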